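-- pv_equiv track=rewrite | github.com/AndersRolighed/Kandidat | 02807/Week3/Exercise5.py | find_common_nodes
-- ===== SOURCE A (Python) =====
-- def find_common_nodes(adjacency_list):
--     common_nodes = {}
--
--     for node1, adjacent1 in adjacency_list.items():
--         for node2, adjacent2 in adjacency_list.items():
--             if node1 < node2:
--                 common = adjacent1.intersection(adjacent2)
--                 common_nodes[(node1, node2)] = common
--
--     return common_nodes
-- ===== SOURCE B (Python) =====
-- def find_common_nodes(adjacency_list):
--     # inverted index: neighbor -> list of nodes whose adjacency set contains it
--     inverted = {}
--     for node, adjacent in adjacency_list.items():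
--         for v in adjacent:
--             inverted.setdefault(v, []).append(node)
--
--     # all ordered pairs (node1 < node2), each starting with an empty common set
--     common_nodes = {(node1, node2): set()
--                     for node1 in adjacency_list
--                     for node2 in adjacency_list
--                     if node1 < node2}
--
--     # distribute each neighbor to every pair of nodes that shares it
--     for node1, adjacent1 in adjacency_list.items():
--         for v in adjacent1:
--             for node2 in inverted[v]:
--                 if node1 < node2:
--                     common_nodes[(node1, node2)].add(v)
--
--     return common_nodes
-- ===== Notes on version B (the rewrite author's own statement) =====
-- stated objective: alternative
-- what changed: Instead of intersecting every pair of adjacency sets, B builds an inverted index (neighbor -> nodes containing it) and distributes each neighbor to all pairs of nodes that share it.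
import Mathlib
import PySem

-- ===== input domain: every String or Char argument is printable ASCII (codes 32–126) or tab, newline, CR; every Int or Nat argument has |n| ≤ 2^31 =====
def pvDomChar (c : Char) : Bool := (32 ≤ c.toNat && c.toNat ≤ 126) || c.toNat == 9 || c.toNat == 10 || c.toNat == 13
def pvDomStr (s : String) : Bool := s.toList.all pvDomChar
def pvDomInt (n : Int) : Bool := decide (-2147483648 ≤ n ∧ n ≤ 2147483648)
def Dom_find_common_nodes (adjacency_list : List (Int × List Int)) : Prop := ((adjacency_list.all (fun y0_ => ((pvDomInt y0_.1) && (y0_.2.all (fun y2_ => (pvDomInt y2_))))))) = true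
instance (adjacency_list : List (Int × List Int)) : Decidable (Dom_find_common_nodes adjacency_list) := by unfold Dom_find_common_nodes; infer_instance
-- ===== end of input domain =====

-- B replaces A's pairwise set intersections by an inverted index (neighbor -> nodes containing it),
-- distributing each neighbor to the pairs of nodes that share it (an alternative algorithm, same result).
-- Outputs are Python dicts keyed by (node1, node2) with set values, flattened here to List (Int × Int × List Int).

-- ===== PORT A =====
-- common_nodes[(k1, k2)] = v  (Python dict assignment: overwrite in place, new key appends),
-- on the flattened pair-keyed association list
def pvInsertPair (d : List (Int × Int × List Int)) (k1 k2 : Int) (v : List Int) :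
    List (Int × Int × List Int) :=
  match d with
  | [] => [(k1, k2, v)]
  | e :: rest =>
    if e.1 = k1 ∧ e.2.1 = k2 then (k1, k2, v) :: rest else e :: pvInsertPair rest k1 k2 v

def find_common_nodes (adjacency_list : List (Int × List Int)) : List (Int × Int × List Int) :=
  adjacency_list.foldl (fun acc p1 =>
    adjacency_list.foldl (fun acc2 p2 =>
      if p1.1 < p2.1 then pvInsertPair acc2 p1.1 p2.1 (PySem.Set.inter p1.2 p2.2) else acc2)
      acc) []

-- ===== PORT B =====
-- common_nodes[(k1, k2)].add(x) (in-place set add; the key is always present when B calls this,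
-- so the no-op on a missing key is exact here)
def pvAddPair (d : List (Int × Int × List Int)) (k1 k2 : Int) (x : Int) :
    List (Int × Int × List Int) :=
  match d with
  | [] => []
  | e :: rest =>
    if e.1 = k1 ∧ e.2.1 = k2 then (e.1, e.2.1, PySem.Set.add e.2.2 x) :: rest
    else e :: pvAddPair rest k1 k2 x

-- inverted index: neighbor v -> list of nodes whose adjacency set contains v
-- (inv.setdefault(v, []).append(node)  =  inv[v] = inv.get(v, []) + [node])
def pvInverted (adjacency_list : List (Int × List Int)) : PySem.Dict Int (List Int) :=
  adjacency_list.foldl (fun d p =>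
    p.2.foldl (fun d v => d.modify v [] (fun ns => ns ++ [p.1])) d) PySem.Dict.empty

def find_common_nodes_alt (adjacency_list : List (Int × List Int)) : List (Int × Int × List Int) :=
  let inv := pvInverted adjacency_list
  -- all ordered pairs (node1 < node2), each starting with an empty common set
  -- (dict comprehension; the pair keys are distinct, so it appends one entry per pair)
  let init := adjacency_list.flatMap (fun p1 =>
    (adjacency_list.filter (fun p2 => decide (p1.1 < p2.1))).map (fun p2 => (p1.1, p2.1, ([] : List Int))))
  -- distribute each neighbor to every pair of nodes that shares it
  adjacency_list.foldl (fun acc p1 =>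
    p1.2.foldl (fun acc2 v =>
      (inv.getD v []).foldl (fun acc3 n2 =>
        if p1.1 < n2 then pvAddPair acc3 p1.1 n2 v else acc3) acc2) acc) init

-- ===== PRECONDITION & SPEC =====
-- Pre_ restricts to the valid encodings of A's argument, a Python dict mapping nodes to SETS of
-- nodes: distinct keys and duplicate-free value lists (a Python dict/set cannot carry duplicates).
def Pre_find_common_nodes (adjacency_list : List (Int × List Int)) : Prop :=
  (adjacency_list.map Prod.fst).Nodup ∧ ∀ p ∈ adjacency_list, p.2.Nodup
instance (adjacency_list : List (Int × List Int)) : Decidable (Pre_find_common_nodes adjacency_list) := by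
  unfold Pre_find_common_nodes; infer_instance

def pvWitness_find_common_nodes : (List (Int × List Int)) :=
  [(1, [2, 3]), (2, [3, 1]), (3, [])]

def Spec_find_common_nodes (adjacency_list : List (Int × List Int)) (out : List (Int × Int × List Int)) : Prop := out = find_common_nodes_alt adjacency_list
instance (adjacency_list : List (Int × List Int)) (out : List (Int × Int × List Int)) : Decidable (Spec_find_common_nodes adjacency_list out) := by unfold Spec_find_common_nodes; infer_instance

-- ===== CLAIM (what is proved, stated in full; the proofs are below) =====
def Claim_equal_find_common_nodes : Prop := ∀ (adjacency_list : List (Int × List Int)), Dom_find_common_nodes adjacency_list → Pre_find_common_nodes adjacency_list → Spec_find_common_nodes adjacency_list (find_common_nodes adjacency_list)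

-- ===== LEMMAS AND PROOFS =====

-- the common normal form of both sides: one row of pairs (p1.1, n2, f p1 p2) for the keys n2 > p1.1
def pvRow (l : List (Int × List Int)) (p1 : Int × List Int)
    (f : Int × List Int → Int × List Int → List Int) : List (Int × Int × List Int) :=
  (l.filter (fun p2 => decide (p1.1 < p2.1))).map (fun p2 => (p1.1, p2.1, f p1 p2))

theorem pvRow_fst {l p1 f} : ∀ e ∈ pvRow l p1 f, e.1 = p1.1 := by
  intro e he
  simp only [pvRow, List.mem_map] at he
  obtain ⟨p2, _, rfl⟩ := he; rfl

theorem pvInsertPair_fresh (d : List (Int × Int × List Int)) (k1 k2 : Int) (v : List Int)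
    (h : ∀ e ∈ d, ¬(e.1 = k1 ∧ e.2.1 = k2)) :
    pvInsertPair d k1 k2 v = d ++ [(k1, k2, v)] := by
  induction d with
  | nil => rfl
  | cons e rest ih =>
    simp only [pvInsertPair]
    rw [if_neg (h e (by simp)), ih (fun e' he' => h e' (by simp [he']))]
    simp

theorem pvInner_fold (p1 : Int × List Int) (f : Int × List Int → Int × List Int → List Int)
    (m : List (Int × List Int)) (acc : List (Int × Int × List Int))
    (hm : (m.map Prod.fst).Nodup)
    (hacc : ∀ e ∈ acc, e.1 ≠ p1.1 ∨ e.2.1 ∉ m.map Prod.fst) :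
    m.foldl (fun acc2 p2 =>
      if p1.1 < p2.1 then pvInsertPair acc2 p1.1 p2.1 (f p1 p2) else acc2) acc
    = acc ++ pvRow m p1 f := by
  induction m generalizing acc with
  | nil => simp [pvRow]
  | cons p2 rest ih =>
    simp only [List.map_cons, List.nodup_cons] at hm
    simp only [List.foldl_cons]
    by_cases hlt : p1.1 < p2.1
    · rw [if_pos hlt]
      rw [pvInsertPair_fresh acc p1.1 p2.1 (f p1 p2) (by
        intro e he hc
        rcases hacc e he with h1 | h1
        · exact h1 hc.1
        · exact h1 (by simp [hc.2]))]
      rw [ih (acc ++ [(p1.1, p2.1, f p1 p2)]) hm.2 (by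
        intro e he
        rcases List.mem_append.mp he with h1 | h1
        · rcases hacc e h1 with h2 | h2
          · exact Or.inl h2
          · exact Or.inr (fun hx => h2 (by simp [hx]))
        · simp at h1
          exact Or.inr (by rw [h1]; simpa using hm.1))]
      simp [pvRow, hlt]
    · rw [if_neg hlt]
      rw [ih acc hm.2 (by
        intro e he
        rcases hacc e he with h1 | h1
        · exact Or.inl h1
        · exact Or.inr (fun hx => h1 (by simp [hx])))]
      simp [pvRow, hlt]

theorem pvOuter_fold (l : List (Int × List Int)) (f : Int × List Int → Int × List Int → List Int)
    (hl : (l.map Prod.fst).Nodup) :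
    ∀ (m : List (Int × List Int)) (acc : List (Int × Int × List Int)),
    (m.map Prod.fst).Nodup →
    (∀ e ∈ acc, e.1 ∉ m.map Prod.fst) →
    m.foldl (fun acc p1 =>
      l.foldl (fun acc2 p2 =>
        if p1.1 < p2.1 then pvInsertPair acc2 p1.1 p2.1 (f p1 p2) else acc2) acc) acc
    = acc ++ m.flatMap (fun p1 => pvRow l p1 f) := by
  intro m
  induction m with
  | nil => simp
  | cons p1 rest ih =>
    intro acc hm hacc
    simp only [List.map_cons, List.nodup_cons] at hm
    simp only [List.foldl_cons]
    rw [pvInner_fold p1 f l acc hl (by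
      intro e he
      exact Or.inl (fun hx => hacc e he (by simp [hx])))]
    rw [ih (acc ++ pvRow l p1 f) hm.2 (by
      intro e he
      rcases List.mem_append.mp he with h1 | h1
      · exact fun hx => hacc e h1 (by simp [hx])
      · rw [pvRow_fst e h1]; exact hm.1)]
    simp [List.flatMap_cons]

-- A in normal form
theorem pvA_normal (l : List (Int × List Int)) (hl : (l.map Prod.fst).Nodup) :
    find_common_nodes l
    = l.flatMap (fun p1 => pvRow l p1 (fun p1 p2 => PySem.Set.inter p1.2 p2.2)) := by
  unfold find_common_nodes
  rw [pvOuter_fold l _ hl l [] hl (by simp)]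
  simp

-- key uniqueness in a dict encoding
theorem pvKey_unique (l : List (Int × List Int)) (hl : (l.map Prod.fst).Nodup)
    {p q : Int × List Int} (hp : p ∈ l) (hq : q ∈ l) (h : p.1 = q.1) : p = q := by
  induction l with
  | nil => cases hp
  | cons a rest ih =>
    simp only [List.map_cons, List.nodup_cons] at hl
    rcases List.mem_cons.mp hp with rfl | hp' <;> rcases List.mem_cons.mp hq with rfl | hq'
    · rfl
    · exact absurd (h ▸ List.mem_map_of_mem (f := Prod.fst) hq') hl.1
    · exact absurd (h ▸ List.mem_map_of_mem (f := Prod.fst) hp') hl.1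
    · exact ih hl.2 hp' hq'

theorem pvFilter_beq_of_nodup (u : List Int) (v : Int) (h : u.Nodup) :
    u.filter (fun x => x == v) = if v ∈ u then [v] else [] := by
  induction u with
  | nil => simp
  | cons x rest ih =>
    simp only [List.nodup_cons] at h
    by_cases hx : x = v
    · subst hx
      have : rest.filter (fun y => y == x) = [] :=
        List.filter_eq_nil_iff.mpr (fun y hy => by
          simp only [beq_iff_eq]
          intro he; exact h.1 (he ▸ hy))
      simp [this]
    · have hne : (x == v) = false := beq_eq_false_iff_ne.mpr hx
      have hvx : ¬v = x := fun hc => hx hc.symm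
      by_cases hv : v ∈ rest
      · simp [hne, ih h.2, hv, hvx]
      · simp [hne, ih h.2, hv, hvx]

theorem pvInverted_inner (p1 : Int) (adj : List Int) (hn : adj.Nodup)
    (d : PySem.Dict Int (List Int)) (v : Int) :
    (adj.foldl (fun d u => d.modify u [] (fun ns => ns ++ [p1])) d).getD v []
    = d.getD v [] ++ (if v ∈ adj then [p1] else []) := by
  have hstep : adj.foldl (fun d u => PySem.Dict.modify d u [] (fun ns => ns ++ [p1])) d
      = (adj.map (fun u => (u, p1))).foldl (fun d q => PySem.Dict.modify d q.1 [] (fun ns => ns ++ [q.2])) d := by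
    rw [List.foldl_map]
  rw [hstep, PySem.Dict.getD_foldl_modify_append]
  congr 1
  rw [List.filter_map, List.map_map]
  have h1 : ((fun p => p.1 == v) ∘ fun u => ((u : Int), p1)) = fun u => u == v := rfl
  rw [h1, pvFilter_beq_of_nodup adj v hn]
  by_cases hv : v ∈ adj <;> simp [hv]

-- characterisation of the inverted index
theorem pvInverted_aux (v : Int) :
    ∀ (l : List (Int × List Int)) (d : PySem.Dict Int (List Int)), (∀ p ∈ l, p.2.Nodup) →
    (l.foldl (fun d p => p.2.foldl (fun d u => d.modify u [] (fun ns => ns ++ [p.1])) d) d).getD v []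
    = d.getD v [] ++ (l.filter (fun p => p.2.contains v)).map Prod.fst := by
  intro l
  induction l with
  | nil => intro d _; simp
  | cons p rest ih =>
    intro d hv'
    simp only [List.foldl_cons]
    rw [ih _ (fun q hq => hv' q (List.mem_cons_of_mem p hq)),
        pvInverted_inner p.1 p.2 (hv' p List.mem_cons_self) d v]
    by_cases hm : v ∈ p.2
    · have hc : p.2.contains v = true := (PySem.Set.contains_iff p.2 v).mpr hm
      simp [List.filter_cons, hc, hm]
    · have hc : p.2.contains v = false := by
        rw [← Bool.not_eq_true]; intro hcc; exact hm ((PySem.Set.contains_iff p.2 v).mp hcc)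
      simp [List.filter_cons, hc, hm]

theorem pvInverted_getD (l : List (Int × List Int)) (hv : ∀ p ∈ l, p.2.Nodup) (v : Int) :
    (pvInverted l).getD v [] = (l.filter (fun p => p.2.contains v)).map Prod.fst := by
  unfold pvInverted
  rw [pvInverted_aux v l PySem.Dict.empty hv]
  simp [PySem.Dict.getD_empty]

theorem pvMem_inverted (l : List (Int × List Int)) (hl : (l.map Prod.fst).Nodup)
    (hv : ∀ p ∈ l, p.2.Nodup) (v : Int) (p2 : Int × List Int) (hp2 : p2 ∈ l) :
    p2.1 ∈ (pvInverted l).getD v [] ↔ v ∈ p2.2 := by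
  rw [pvInverted_getD l hv v]
  constructor
  · intro h
    rcases List.mem_map.mp h with ⟨q, hq, hq1⟩
    rcases List.mem_filter.mp hq with ⟨hql, hqc⟩
    have hqp : q = p2 := pvKey_unique l hl hql hp2 hq1
    rw [← hqp]
    exact (PySem.Set.contains_iff q.2 v).mp hqc
  · intro h
    exact List.mem_map.mpr ⟨p2,
      List.mem_filter.mpr ⟨hp2, (PySem.Set.contains_iff p2.2 v).mpr h⟩, rfl⟩

theorem pvInverted_nodup (l : List (Int × List Int)) (hl : (l.map Prod.fst).Nodup)
    (hv : ∀ p ∈ l, p.2.Nodup) (v : Int) :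
    ((pvInverted l).getD v []).Nodup := by
  rw [pvInverted_getD l hv v]
  exact hl.sublist (List.filter_sublist.map Prod.fst)

-- pvAddPair facts
theorem pvAddPair_eq_self (d : List (Int × Int × List Int)) (k1 k2 x : Int)
    (h : ∀ e ∈ d, ¬(e.1 = k1 ∧ e.2.1 = k2)) : pvAddPair d k1 k2 x = d := by
  induction d with
  | nil => rfl
  | cons e rest ih =>
    simp only [pvAddPair]
    rw [if_neg (h e (by simp)), ih (fun e' he' => h e' (by simp [he']))]

theorem pvAddPair_append_left (d1 d2 : List (Int × Int × List Int)) (k1 k2 x : Int)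
    (h1 : ∀ e ∈ d1, ¬(e.1 = k1 ∧ e.2.1 = k2)) :
    pvAddPair (d1 ++ d2) k1 k2 x = d1 ++ pvAddPair d2 k1 k2 x := by
  induction d1 with
  | nil => rfl
  | cons e rest ih =>
    simp only [List.cons_append, pvAddPair]
    rw [if_neg (h1 e (by simp)), ih (fun e' he' => h1 e' (by simp [he']))]

theorem pvAddPair_append_right (d1 d2 : List (Int × Int × List Int)) (k1 k2 x : Int)
    (h2 : ∀ e ∈ d2, ¬(e.1 = k1 ∧ e.2.1 = k2)) :
    pvAddPair (d1 ++ d2) k1 k2 x = pvAddPair d1 k1 k2 x ++ d2 := by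
  induction d1 with
  | nil => simpa using pvAddPair_eq_self d2 k1 k2 x h2
  | cons e rest ih =>
    simp only [List.cons_append, pvAddPair]
    by_cases he : e.1 = k1 ∧ e.2.1 = k2
    · rw [if_pos he, if_pos he]; simp
    · rw [if_neg he, if_neg he, ih]; simp

theorem pvAddPair_append (d1 d2 : List (Int × Int × List Int)) (k1 k2 x : Int)
    (h1 : ∀ e ∈ d1, e.1 ≠ k1) (h2 : ∀ e ∈ d2, e.1 ≠ k1) (dm : List (Int × Int × List Int)) :
    pvAddPair (d1 ++ dm ++ d2) k1 k2 x = d1 ++ pvAddPair dm k1 k2 x ++ d2 := by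
  rw [List.append_assoc, pvAddPair_append_left d1 (dm ++ d2) k1 k2 x
        (fun e he hc => h1 e he hc.1),
      pvAddPair_append_right dm d2 k1 k2 x (fun e he hc => h2 e he hc.1),
      List.append_assoc]

-- a single update hits at most the one entry with matching keys
theorem pvAddPair_eq_map (d : List (Int × Int × List Int)) (k1 k2 x : Int)
    (hsec : (d.map (fun e => e.2.1)).Nodup) :
    pvAddPair d k1 k2 x
    = d.map (fun e => if e.1 = k1 ∧ e.2.1 = k2 then (e.1, e.2.1, PySem.Set.add e.2.2 x) else e) := by
  induction d with
  | nil => rfl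
  | cons e rest ih =>
    simp only [List.map_cons, List.nodup_cons] at hsec
    simp only [pvAddPair, List.map_cons]
    by_cases he : e.1 = k1 ∧ e.2.1 = k2
    · rw [if_pos he, if_pos he]
      have hrest : rest.map (fun e' => if e'.1 = k1 ∧ e'.2.1 = k2 then (e'.1, e'.2.1, PySem.Set.add e'.2.2 x) else e') = rest :=
        calc rest.map (fun e' => if e'.1 = k1 ∧ e'.2.1 = k2 then (e'.1, e'.2.1, PySem.Set.add e'.2.2 x) else e')
            = rest.map id := by
              apply List.map_congr_left
              intro e' he'
              rw [if_neg]
              · rfl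
              · rintro ⟨-, hc2⟩
                exact hsec.1 (by
                  rw [he.2, ← hc2]
                  exact List.mem_map_of_mem (f := fun e => e.2.1) he')
          _ = rest := List.map_id rest
      rw [hrest]
    · rw [if_neg he, if_neg he, ih hsec.2]

-- components are preserved by the conditional value updates
theorem pvMapKeys_sec (d : List (Int × Int × List Int)) (g : Int × Int × List Int → List Int)
    (c : Int × Int × List Int → Prop) [DecidablePred c] :
    ((d.map (fun e => if c e then (e.1, e.2.1, g e) else e)).map (fun e => e.2.1))
    = d.map (fun e => e.2.1) := by
  rw [List.map_map]
  apply List.map_congr_left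
  intro e _
  by_cases hc : c e <;> simp [hc]

theorem pvMapKeys_fst (d : List (Int × Int × List Int)) (g : Int × Int × List Int → List Int)
    (c : Int × Int × List Int → Prop) [DecidablePred c] (k1 : Int)
    (hfst : ∀ e ∈ d, e.1 = k1) :
    ∀ e ∈ d.map (fun e => if c e then (e.1, e.2.1, g e) else e), e.1 = k1 := by
  intro e he
  rcases List.mem_map.mp he with ⟨e', he', rfl⟩
  by_cases hc : c e' <;> simp [hc, hfst e' he']

-- the innermost loop of the third pass, on a row with distinct pair keys
theorem pvFold_add_map (ks : List Int) (k1 x : Int) (hks : ks.Nodup) :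
    ∀ (d : List (Int × Int × List Int)), (d.map (fun e => e.2.1)).Nodup →
    (∀ e ∈ d, e.1 = k1) →
    ks.foldl (fun a n2 => if k1 < n2 then pvAddPair a k1 n2 x else a) d
    = d.map (fun e => if e.2.1 ∈ ks ∧ k1 < e.2.1 then (e.1, e.2.1, PySem.Set.add e.2.2 x) else e) := by
  induction ks with
  | nil => intro d _ _; simp
  | cons n2 rest ih =>
    intro d hsec hfst
    simp only [List.nodup_cons] at hks
    simp only [List.foldl_cons]
    have hstep : (if k1 < n2 then pvAddPair d k1 n2 x else d)
        = d.map (fun e => if e.2.1 = n2 ∧ k1 < e.2.1 then (e.1, e.2.1, PySem.Set.add e.2.2 x) else e) := by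
      by_cases hlt : k1 < n2
      · rw [if_pos hlt, pvAddPair_eq_map d k1 n2 x hsec]
        apply List.map_congr_left
        intro e he
        by_cases h2 : e.2.1 = n2
        · rw [if_pos ⟨hfst e he, h2⟩, if_pos ⟨h2, h2 ▸ hlt⟩]
        · rw [if_neg (fun hc => h2 hc.2), if_neg (fun hc => h2 hc.1)]
      · rw [if_neg hlt]
        calc d = d.map id := (List.map_id d).symm
          _ = _ := by
            apply List.map_congr_left
            intro e _
            rw [if_neg]
            · rfl
            · rintro ⟨h2, hc⟩
              exact hlt (h2 ▸ hc)
    have hrec := ih hks.2 (d.map (fun e => if e.2.1 = n2 ∧ k1 < e.2.1 then (e.1, e.2.1, PySem.Set.add e.2.2 x) else e))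
      (by rw [pvMapKeys_sec]; exact hsec) (pvMapKeys_fst d _ _ k1 hfst)
    rw [hstep, hrec, List.map_map]
    apply List.map_congr_left
    intro e _
    simp only [Function.comp_apply]
    by_cases hc1 : e.2.1 = n2 ∧ k1 < e.2.1
    · simp only [if_pos hc1]
      rw [if_neg (by rintro ⟨hm, -⟩; exact hks.1 (hc1.1 ▸ hm)),
          if_pos ⟨List.mem_cons.mpr (Or.inl hc1.1), hc1.2⟩]
    · simp only [if_neg hc1]
      by_cases hc2 : e.2.1 ∈ rest ∧ k1 < e.2.1
      · rw [if_pos hc2, if_pos ⟨List.mem_cons.mpr (Or.inr hc2.1), hc2.2⟩]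
      · rw [if_neg hc2, if_neg]
        rintro ⟨hm, hlt⟩
        rcases List.mem_cons.mp hm with h | h
        · exact hc1 ⟨h, hlt⟩
        · exact hc2 ⟨h, hlt⟩

-- the middle loop of the third pass: each entry of the row accumulates its own neighbours
theorem pvMid_fold (inv : PySem.Dict Int (List Int)) (k1 : Int)
    (hinv : ∀ v, ((inv.getD v []).Nodup)) (us : List Int) :
    ∀ (d : List (Int × Int × List Int)), (d.map (fun e => e.2.1)).Nodup →
    (∀ e ∈ d, e.1 = k1) →
    us.foldl (fun acc2 v =>
      (inv.getD v []).foldl (fun a n2 => if k1 < n2 then pvAddPair a k1 n2 v else a) acc2) d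
    = d.map (fun e => (e.1, e.2.1,
        us.foldl (fun s v => if e.2.1 ∈ inv.getD v [] ∧ k1 < e.2.1 then PySem.Set.add s v else s) e.2.2)) := by
  induction us with
  | nil => intro d _ _; simp
  | cons v rest ih =>
    intro d hsec hfst
    simp only [List.foldl_cons]
    have hrec := ih (d.map (fun e => if e.2.1 ∈ inv.getD v [] ∧ k1 < e.2.1 then (e.1, e.2.1, PySem.Set.add e.2.2 v) else e))
      (by rw [pvMapKeys_sec]; exact hsec) (pvMapKeys_fst d _ _ k1 hfst)
    rw [pvFold_add_map (inv.getD v []) k1 v (hinv v) d hsec hfst, hrec, List.map_map]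
    apply List.map_congr_left
    intro e _
    simp only [Function.comp_apply]
    by_cases hc : e.2.1 ∈ inv.getD v [] ∧ k1 < e.2.1
    · simp only [if_pos hc]
    · simp only [if_neg hc]

-- building a set by conditional adds of fresh distinct elements is a filter
theorem pvFoldl_add_filter (q : Int → Bool) (u : List Int) (hu : u.Nodup) :
    ∀ (s : List Int), (∀ w ∈ u, w ∉ s) →
    u.foldl (fun s v => if q v then PySem.Set.add s v else s) s = s ++ u.filter q := by
  induction u with
  | nil => intro s _; simp
  | cons v rest ih =>
    intro s hs
    simp only [List.nodup_cons] at hu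
    simp only [List.foldl_cons]
    by_cases hq : q v
    · have hvs : v ∉ s := hs v List.mem_cons_self
      have hcon : s.contains v = false := by
        rw [← Bool.not_eq_true]; intro hc; exact hvs ((PySem.Set.contains_iff s v).mp hc)
      have hadd : PySem.Set.add s v = s ++ [v] := by
        simp [PySem.Set.add, hcon, hvs]
      rw [if_pos hq, hadd, ih hu.2 (s ++ [v]) (by
        intro w hw
        simp only [List.mem_append, List.mem_singleton]
        rintro (h | rfl)
        · exact hs w (List.mem_cons_of_mem v hw) h
        · exact hu.1 hw)]
      simp [List.filter_cons, hq]
    · rw [if_neg hq, ih hu.2 s (fun w hw => hs w (List.mem_cons_of_mem v hw))]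
      simp [List.filter_cons, hq]

-- seconds of a row are distinct
theorem pvRow_sec (l : List (Int × List Int)) (p1 : Int × List Int)
    (f : Int × List Int → Int × List Int → List Int) (hl : (l.map Prod.fst).Nodup) :
    ((pvRow l p1 f).map (fun e => e.2.1)).Nodup := by
  unfold pvRow
  rw [List.map_map]
  have h1 : ((fun (e : Int × Int × List Int) => e.2.1) ∘ fun p2 => (p1.1, p2.1, f p1 p2))
      = Prod.fst := rfl
  rw [h1]
  exact hl.sublist (List.filter_sublist.map Prod.fst)

-- the third pass transforms one row of empty sets into the row of intersections
theorem pvRow_pass (l : List (Int × List Int)) (hl : (l.map Prod.fst).Nodup)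
    (hv : ∀ p ∈ l, p.2.Nodup) (p1 : Int × List Int) (hp1 : p1 ∈ l) :
    p1.2.foldl (fun acc2 v =>
      ((pvInverted l).getD v []).foldl (fun a n2 => if p1.1 < n2 then pvAddPair a p1.1 n2 v else a) acc2)
      (pvRow l p1 (fun _ _ => []))
    = pvRow l p1 (fun p1 p2 => PySem.Set.inter p1.2 p2.2) := by
  rw [pvMid_fold (pvInverted l) p1.1 (pvInverted_nodup l hl hv) p1.2
      (pvRow l p1 (fun _ _ => [])) (pvRow_sec l p1 _ hl) (pvRow_fst)]
  unfold pvRow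
  rw [List.map_map]
  apply List.map_congr_left
  intro p2 hp2
  rcases List.mem_filter.mp hp2 with ⟨hp2l, hltd⟩
  have hlt : p1.1 < p2.1 := of_decide_eq_true hltd
  simp only [Function.comp_apply]
  refine Prod.ext rfl (Prod.ext rfl ?_)
  show p1.2.foldl (fun s v => if p2.1 ∈ (pvInverted l).getD v [] ∧ p1.1 < p2.1 then PySem.Set.add s v else s) []
      = PySem.Set.inter p1.2 p2.2
  have hfun : (fun (s : List Int) (v : Int) => if p2.1 ∈ (pvInverted l).getD v [] ∧ p1.1 < p2.1 then PySem.Set.add s v else s)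
      = fun s v => if p2.2.contains v then PySem.Set.add s v else s := by
    funext s v
    refine if_congr ?_ rfl rfl
    rw [pvMem_inverted l hl hv v p2 hp2l]
    constructor
    · intro h; exact (PySem.Set.contains_iff p2.2 v).mpr h.1
    · intro h; exact ⟨(PySem.Set.contains_iff p2.2 v).mp h, hlt⟩
  rw [hfun, pvFoldl_add_filter (fun v => p2.2.contains v) p1.2 (hv p1 hp1) [] (by simp)]
  simp [PySem.Set.inter]

-- the third pass leaves entries of other rows untouched
theorem pvInnermost_append (ks : List Int) (k1 x : Int)
    (P S : List (Int × Int × List Int)) (hP : ∀ e ∈ P, e.1 ≠ k1) (hS : ∀ e ∈ S, e.1 ≠ k1) :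
    ∀ (X : List (Int × Int × List Int)),
    ks.foldl (fun a n2 => if k1 < n2 then pvAddPair a k1 n2 x else a) (P ++ X ++ S)
    = P ++ ks.foldl (fun a n2 => if k1 < n2 then pvAddPair a k1 n2 x else a) X ++ S := by
  induction ks with
  | nil => intro X; simp
  | cons n2 rest ih =>
    intro X
    simp only [List.foldl_cons]
    by_cases hlt : k1 < n2
    · rw [if_pos hlt, if_pos hlt, pvAddPair_append P S k1 n2 x hP hS X, ih]
    · rw [if_neg hlt, if_neg hlt, ih]

theorem pvStep3_append (inv : PySem.Dict Int (List Int)) (p1 : Int × List Int)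
    (P S : List (Int × Int × List Int)) (hP : ∀ e ∈ P, e.1 ≠ p1.1) (hS : ∀ e ∈ S, e.1 ≠ p1.1) :
    ∀ (X : List (Int × Int × List Int)),
    p1.2.foldl (fun acc2 v =>
      (inv.getD v []).foldl (fun a n2 => if p1.1 < n2 then pvAddPair a p1.1 n2 v else a) acc2)
      (P ++ X ++ S)
    = P ++ p1.2.foldl (fun acc2 v =>
        (inv.getD v []).foldl (fun a n2 => if p1.1 < n2 then pvAddPair a p1.1 n2 v else a) acc2) X ++ S := by
  induction p1.2 with
  | nil => intro X; simp
  | cons v rest ih =>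
    intro X
    simp only [List.foldl_cons]
    rw [pvInnermost_append (inv.getD v []) p1.1 v P S hP hS X, ih]

-- the outer loop of the third pass, row by row
theorem pvOuter3 (l : List (Int × List Int)) (hl : (l.map Prod.fst).Nodup)
    (hv : ∀ p ∈ l, p.2.Nodup) :
    ∀ (m : List (Int × List Int)), (∀ p ∈ m, p ∈ l) → (m.map Prod.fst).Nodup →
    ∀ (P : List (Int × Int × List Int)), (∀ e ∈ P, e.1 ∉ m.map Prod.fst) →
    m.foldl (fun acc p1 =>
      p1.2.foldl (fun acc2 v =>
        ((pvInverted l).getD v []).foldl (fun a n2 => if p1.1 < n2 then pvAddPair a p1.1 n2 v else a) acc2) acc)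
      (P ++ m.flatMap (fun p1 => pvRow l p1 (fun _ _ => [])))
    = P ++ m.flatMap (fun p1 => pvRow l p1 (fun p1 p2 => PySem.Set.inter p1.2 p2.2)) := by
  intro m
  induction m with
  | nil => intro _ _ P _; simp
  | cons p1 rest ih =>
    intro hsub hm P hP
    simp only [List.map_cons, List.nodup_cons] at hm
    simp only [List.foldl_cons, List.flatMap_cons]
    have hS : ∀ e ∈ rest.flatMap (fun p1 => pvRow l p1 (fun _ _ => [])), e.1 ≠ p1.1 := by
      intro e he
      rcases List.mem_flatMap.mp he with ⟨q, hq, hqe⟩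
      rw [pvRow_fst e hqe]
      intro hc
      exact hm.1 (hc ▸ List.mem_map_of_mem (f := Prod.fst) hq)
    have hP1 : ∀ e ∈ P, e.1 ≠ p1.1 := fun e he hc => hP e he (by simp [hc])
    rw [← List.append_assoc,
        pvStep3_append (pvInverted l) p1 P _ hP1 hS _,
        pvRow_pass l hl hv p1 (hsub p1 List.mem_cons_self)]
    have hgoal := ih (fun q hq => hsub q (List.mem_cons_of_mem p1 hq)) hm.2
        (P ++ pvRow l p1 (fun p1 p2 => PySem.Set.inter p1.2 p2.2)) (by
      intro e he
      rcases List.mem_append.mp he with h | h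
      · exact fun hc => hP e h (by simp [hc])
      · rw [pvRow_fst e h]; exact hm.1)
    rw [hgoal, List.append_assoc]

-- B in normal form
theorem pvB_normal (l : List (Int × List Int)) (hl : (l.map Prod.fst).Nodup)
    (hv : ∀ p ∈ l, p.2.Nodup) :
    find_common_nodes_alt l
    = l.flatMap (fun p1 => pvRow l p1 (fun p1 p2 => PySem.Set.inter p1.2 p2.2)) := by
  show l.foldl (fun acc p1 =>
      p1.2.foldl (fun acc2 v =>
        ((pvInverted l).getD v []).foldl (fun a n2 => if p1.1 < n2 then pvAddPair a p1.1 n2 v else a) acc2) acc)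
      (l.flatMap (fun p1 =>
        (l.filter (fun p2 => decide (p1.1 < p2.1))).map (fun p2 => (p1.1, p2.1, ([] : List Int)))))
    = _
  have h := pvOuter3 l hl hv l (fun p hp => hp) hl [] (by simp)
  simpa [pvRow] using h

-- ===== VERDICT (by name: the statement is the Claim_ definition above) =====
theorem find_common_nodes_spec : Claim_equal_find_common_nodes := by
  intro l _ hpre
  unfold Spec_find_common_nodes
  rw [pvA_normal l hpre.1, pvB_normal l hpre.1 hpre.2]
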